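-- pv_equiv track=rewrite | github.com/gabgerson/coding-challenges | data-algo/max_tickets.py | max_tickets
-- ===== SOURCE A (Python) =====
-- def max_tickets(tickets):
--     #if len tickets == 1 return 1
--     if len(tickets) == 1:
--         return 1
--     # sort the tickets list
--     sorted_tickets = sorted(tickets)
--     # keep track of current sub-sequence length
--     curr_sub_len = 1
--     #max sub sequesce
--     max_sub = 1
--     #prev num
--     prev_price = sorted_tickets[0]
--     # loop through tickets
--
--     for i in range(1, len(sorted_tickets)):
--     # if check if current num is equal to plus 1 previous num or equal to previous num
--         if prev_price == sorted_tickets[i] or prev_price + 1 == sorted_tickets[i]: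
--     #add 1 to current subsquence length
--             curr_sub_len += 1
--     # if current not eqaul to +1 prev or equal to prev
--
--     # current subsequence length reset to 1
--         else:
--             curr_sub_len = 1
--         # max subsequnce === max( max_sub, current sub)
--         max_sub = max(max_sub, curr_sub_len)
--     #set prev_price to sorted_tickets[i]
--         prev_price = sorted_tickets[i]
--
--     # max_sub = max(max_sub, curr_sub_len)
--
--     return max_sub
-- ===== SOURCE B (Python) =====
-- def max_tickets(tickets):
--     counts = {}
--     for t in tickets:
--         counts[t] = counts.get(t, 0) + 1
--     present = set(counts)
--     best = 0
--     for v in present: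
--         if v - 1 not in present:
--             total = 0
--             w = v
--             while w in present:
--                 total += counts[w]
--                 w += 1
--             best = max(best, total)
--     return best
-- ===== Notes on version B (the rewrite author's own statement) =====
-- stated objective: alternative
-- what changed: Replaces sort-then-adjacent-scan with a frequency dict plus hashset scan: for each value whose predecessor is absent, walk the consecutive values upward summing their multiplicities; no sorting at all.
import Mathlib
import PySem

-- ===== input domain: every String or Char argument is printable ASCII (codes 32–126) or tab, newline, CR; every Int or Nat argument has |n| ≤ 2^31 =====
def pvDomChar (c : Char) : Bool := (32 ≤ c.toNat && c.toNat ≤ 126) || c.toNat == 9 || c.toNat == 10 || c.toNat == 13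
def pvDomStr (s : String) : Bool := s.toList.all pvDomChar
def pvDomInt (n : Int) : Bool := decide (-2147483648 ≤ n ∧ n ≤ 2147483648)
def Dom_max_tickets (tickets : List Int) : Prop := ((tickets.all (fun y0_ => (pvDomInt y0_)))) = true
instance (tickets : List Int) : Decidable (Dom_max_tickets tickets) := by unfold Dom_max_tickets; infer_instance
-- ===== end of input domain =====

-- B replaces A's sort-then-adjacent-scan by a frequency dict + hashset scan of consecutive
-- value runs (no sorting); neither version mutates its argument.

-- ===== PORT A =====
def max_tickets (tickets : List Int) : Int :=
  if tickets.length == 1 then 1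
  else
    let sorted_tickets := PySem.List.sorted tickets (fun x => x)
    -- sorted_tickets[0] : IndexError on the empty list — excluded by Pre_ (the .getD default is never used inside Pre_)
    let prev_price := PySem.List.pyGetD sorted_tickets 0 0
    let st := (PySem.List.pyRange 1 (sorted_tickets.length : Int)).foldl
      (fun (st : Int × Int × Int) i =>
        -- loop indices 1..len-1 are always in range, so pyGetD is exact here
        let x := PySem.List.pyGetD sorted_tickets i 0
        let curr_sub_len := if st.2.2 == x || st.2.2 + 1 == x then st.1 + 1 else 1
        (curr_sub_len, max st.2.1 curr_sub_len, x))
      (1, 1, prev_price)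
    st.2.1

-- ===== PORT B =====
-- 'while w in present' ported with fuel = present.length: the walk visits distinct members of
-- present with strictly increasing w, so the fuel never runs out before the membership test fails.
def walkRunB (counts : PySem.Dict Int Int) (present : List Int) : Nat → Int → Int → Int
  | 0, _, total => total
  | fuel + 1, w, total =>
      if present.contains w then
        walkRunB counts present fuel (w + 1) (total + counts.getD w 0)
      else total

def max_tickets_alt (tickets : List Int) : Int :=
  let counts := tickets.foldl (fun d t => d.insert t (d.getD t 0 + 1)) PySem.Dict.empty
  let present : PySem.Set Int := PySem.Set.ofList counts.keys
  present.foldl (fun best v =>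
    if present.contains (v - 1) then best
    else max best (walkRunB counts present present.length v 0)) 0

-- ===== PRECONDITION & SPEC =====
-- Pre_ excludes only the empty list, on which A raises IndexError (sorted_tickets[0]).
def Pre_max_tickets (tickets : List Int) : Prop := tickets ≠ []
instance (tickets : List Int) : Decidable (Pre_max_tickets tickets) := by unfold Pre_max_tickets; infer_instance
def pvWitness_max_tickets : List Int := ([3, 1, 2, 5])

def Spec_max_tickets (tickets : List Int) (out : Int) : Prop := out = max_tickets_alt tickets
instance (tickets : List Int) (out : Int) : Decidable (Spec_max_tickets tickets out) := by unfold Spec_max_tickets; infer_instance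

-- ===== CLAIM (what is proved, stated in full; the proofs are below) =====
def Claim_equal_max_tickets : Prop := ∀ (tickets : List Int), Dom_max_tickets tickets → Pre_max_tickets tickets → Spec_max_tickets tickets (max_tickets tickets)

-- ===== LEMMAS AND PROOFS =====

theorem card_filter_succ_lt (xs : List Int) (v : Int) (h : v ∈ xs) :
    (xs.toFinset.filter (fun w => v + 1 ≤ w)).card < (xs.toFinset.filter (fun w => v ≤ w)).card := by
  apply Finset.card_lt_card
  constructor
  · intro w hw; simp only [Finset.mem_filter] at hw ⊢; exact ⟨hw.1, by omega⟩
  · intro hsub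
    have hv : v ∈ xs.toFinset.filter (fun w => v ≤ w) := by
      simp only [Finset.mem_filter, List.mem_toFinset]; exact ⟨h, le_refl v⟩
    have := hsub hv
    simp only [Finset.mem_filter] at this; omega

/-- Total multiplicity of the maximal consecutive run of values present in `xs` starting
at `v` (0 if `v` is absent): the quantity both programs maximise. -/
def ivsum (xs : List Int) (v : Int) : Int :=
  if h : v ∈ xs then (xs.count v : Int) + ivsum xs (v + 1) else 0
termination_by (xs.toFinset.filter (fun w => v ≤ w)).card
decreasing_by exact card_filter_succ_lt xs v h

theorem ivsum_of_not_mem {xs : List Int} {v : Int} (h : v ∉ xs) : ivsum xs v = 0 := by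
  rw [ivsum]; simp [h]

/-- `ivsum` only depends on the multiplicities of values ≥ v. -/
theorem ivsum_congr_ge (xs : List Int) (v : Int) :
    ∀ ys : List Int, (∀ w, v ≤ w → xs.count w = ys.count w) → ivsum xs v = ivsum ys v := by
  fun_induction ivsum xs v with
  | case1 v h ih =>
    intro ys hc
    have hv : v ∈ ys := by
      have h1 := hc v le_rfl
      have h2 := List.count_pos_iff.mpr h
      exact List.count_pos_iff.mp (by omega)
    rw [show ivsum ys v = (ys.count v : Int) + ivsum ys (v + 1) by rw [ivsum]; simp [hv]]
    rw [hc v le_rfl, ih ys (fun w hw => hc w (by omega))]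
  | case2 v h =>
    intro ys hc
    have hv : v ∉ ys := by
      have h1 := hc v le_rfl
      have h0 : xs.count v = 0 := List.count_eq_zero.mpr h
      intro hm; have := List.count_pos_iff.mpr hm; omega
    rw [ivsum]; simp [hv]

/-- A's scan, abstracted: current run length, previous value, remaining (sorted) values;
returns the max of the current run's final length and of all later runs. -/
def hrun : Int → Int → List Int → Int
  | curr, _, [] => curr
  | curr, prev, x :: xs =>
      if x = prev ∨ x = prev + 1 then hrun (curr + 1) x xs else max curr (hrun 1 x xs)

/-- Length of the adjacent prefix and the remaining list. -/
def runsSplit : Int → List Int → Nat × List Int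
  | _, [] => (0, [])
  | prev, x :: xs =>
      if x = prev ∨ x = prev + 1 then
        let p := runsSplit x xs; (p.1 + 1, p.2)
      else (0, x :: xs)

theorem hrun_ge : ∀ (l : List Int) (curr prev : Int), curr ≤ hrun curr prev l := by
  intro l
  induction l with
  | nil => intro curr prev; simp [hrun]
  | cons x xs ih =>
    intro curr prev
    simp only [hrun]
    split
    · exact le_trans (by omega) (ih (curr + 1) x)
    · exact le_max_left _ _

theorem hrun_eq_runsSplit : ∀ (l : List Int) (curr prev : Int),
    hrun curr prev l =
      (match runsSplit prev l with
       | (k, []) => curr + (k : Int)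
       | (k, y :: ys) => max (curr + (k : Int)) (hrun 1 y ys)) := by
  intro l
  induction l with
  | nil => intro curr prev; simp [hrun, runsSplit]
  | cons x xs ih =>
    intro curr prev
    simp only [hrun, runsSplit]
    split
    · rw [ih (curr + 1) x]
      rcases hr : runsSplit x xs with ⟨k, r⟩
      cases r with
      | nil => simp; ring
      | cons y ys =>
        simp only []
        have : curr + 1 + (k : Int) = curr + ((k : Int) + 1) := by ring
        rw [this]; push_cast; rfl
    · simp only []
      congr 1
      · push_cast; ring

theorem hrun_rs_nil (l : List Int) (curr prev : Int) (k : Nat)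
    (h : runsSplit prev l = (k, [])) : hrun curr prev l = curr + (k : Int) := by
  rw [hrun_eq_runsSplit, h]

theorem hrun_rs_cons (l : List Int) (curr prev : Int) (k : Nat) (y : Int) (ys : List Int)
    (h : runsSplit prev l = (k, y :: ys)) :
    hrun curr prev l = max (curr + (k : Int)) (hrun 1 y ys) := by
  rw [hrun_eq_runsSplit, h]

theorem countP_split (l : List Int) (p q r : Int → Bool)
    (h : ∀ x, p x = (q x || r x)) (hd : ∀ x, ¬(q x = true ∧ r x = true)) :
    l.countP p = l.countP q + l.countP r := by
  induction l with
  | nil => simp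
  | cons x xs ih =>
    simp only [List.countP_cons, h x, ih]
    rcases hq : q x <;> rcases hr : r x <;> simp_all <;> omega

theorem pred_split_point (v t x : Int) (hvt : v ≤ t) :
    decide (v ≤ x ∧ x ≤ t) = ((x == v) || decide (v + 1 ≤ x ∧ x ≤ t)) := by
  by_cases h1 : v ≤ x ∧ x ≤ t <;> by_cases h2 : x = v <;> by_cases h3 : v + 1 ≤ x ∧ x ≤ t <;>
    simp [h1, h2, h3] <;> omega

/-- Over a fully-present interval [v,t] whose successor t+1 is absent, `ivsum` counts the
elements lying in the interval. -/
theorem ivsum_interval : ∀ (n : Nat) (v t : Int) (L : List Int), (t + 1 - v).toNat = n →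
    v ≤ t + 1 → (∀ w, v ≤ w → w ≤ t → w ∈ L) → (t + 1) ∉ L →
    ivsum L v = (L.countP (fun x => decide (v ≤ x ∧ x ≤ t)) : Int) := by
  intro n
  induction n with
  | zero =>
    intro v t L hn hv _ hnot
    have hvt : v = t + 1 := by omega
    subst hvt
    rw [ivsum, dif_neg hnot,
      List.countP_eq_zero.mpr (by intro x _; simp only [decide_eq_true_eq]; omega)]
    simp
  | succ n ih =>
    intro v t L hn hv hall hnot
    have hvt : v ≤ t := by omega
    have hvL : v ∈ L := hall v le_rfl hvt
    rw [ivsum]; simp only [hvL, dif_pos]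
    rw [ih (v + 1) t L (by omega) (by omega) (fun w h1 h2 => hall w (by omega) h2) hnot]
    rw [countP_split L (fun x => decide (v ≤ x ∧ x ≤ t)) (fun x => x == v)
        (fun x => decide (v + 1 ≤ x ∧ x ≤ t))
        (fun x => pred_split_point v t x hvt)
        (by intro x ⟨h1, h2⟩; simp at h1 h2; omega)]
    rw [List.count_eq_countP]
    omega

/-- Structure of the first run block of a sorted list. -/
theorem runsSplit_struct : ∀ (xs : List Int) (prev : Int),
    List.Pairwise (· ≤ ·) (prev :: xs) →
    ∃ t : Int, prev ≤ t ∧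
      (∀ w, prev ≤ w → w ≤ t → w ∈ prev :: xs) ∧
      (∀ x ∈ prev :: xs, x ≤ t ∨ t + 2 ≤ x) ∧
      (∀ x ∈ (runsSplit prev xs).2, t + 2 ≤ x) ∧
      (((prev :: xs).countP (fun x => decide (x ≤ t)) : Int) = (runsSplit prev xs).1 + 1) ∧
      (runsSplit prev xs).2 = xs.drop (runsSplit prev xs).1 ∧
      (∀ x ∈ prev :: xs.take (runsSplit prev xs).1, x ≤ t) ∧
      (∀ x ∈ prev :: xs, t + 2 ≤ x → x ∈ (runsSplit prev xs).2) := by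
  intro xs
  induction xs with
  | nil =>
    intro prev _
    refine ⟨prev, le_rfl, ?_, ?_, ?_, ?_, ?_, ?_, ?_⟩
    · intro w h1 h2; simp; omega
    · intro y hy; simp at hy; simp [hy]
    · simp [runsSplit]
    · simp [runsSplit]
    · simp [runsSplit]
    · simp [runsSplit]
    · simp [runsSplit]
  | cons x xs ih =>
    intro prev hp
    rw [List.pairwise_cons] at hp
    have hpx : prev ≤ x := hp.1 x (by simp)
    by_cases hadj : x = prev ∨ x = prev + 1
    · obtain ⟨t, hxt, H1, H2, H3, H4, H5, H6, H7⟩ := ih x hp.2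
      have hks : runsSplit prev (x :: xs) = ((runsSplit x xs).1 + 1, (runsSplit x xs).2) := by
        simp [runsSplit, hadj]
      refine ⟨t, by omega, ?_, ?_, ?_, ?_, ?_, ?_, ?_⟩
      · intro w h1 h2
        rcases eq_or_lt_of_le h1 with he | hlt
        · simp [← he]
        · have : x ≤ w := by omega
          have := H1 w this h2
          simp at this ⊢; tauto
      · intro y hy
        rcases List.mem_cons.mp hy with he | hm
        · left; omega
        · exact H2 y hm
      · rw [hks]; exact H3
      · rw [hks]
        rw [List.countP_cons]
        simp only [decide_eq_true_eq]
        rw [if_pos (by omega : prev ≤ t)] at *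
        push_cast
        push_cast at H4
        omega
      · rw [hks]; simpa using H5
      · rw [hks]
        intro y hy
        rcases List.mem_cons.mp hy with he | hm
        · omega
        · rw [List.take_succ_cons] at hm
          rcases List.mem_cons.mp hm with he2 | hm2
          · exact H6 y (by simp [he2])
          · exact H6 y (by simp; tauto)
      · rw [hks]
        intro y hy hge
        rcases List.mem_cons.mp hy with he | hm
        · omega
        · exact H7 y hm hge
    · have hx2 : prev + 2 ≤ x := by omega
      have hall : ∀ z ∈ x :: xs, x ≤ z := by
        intro z hz
        rcases List.mem_cons.mp hz with he | hm
        · omega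
        · exact (List.pairwise_cons.mp hp.2).1 z hm
      have hks : runsSplit prev (x :: xs) = (0, x :: xs) := by
        simp [runsSplit, hadj]
      refine ⟨prev, le_rfl, ?_, ?_, ?_, ?_, ?_, ?_, ?_⟩
      · intro w h1 h2
        have : w = prev := by omega
        simp [this]
      · intro y hy
        rcases List.mem_cons.mp hy with he | hm
        · left; omega
        · right; have := hall y hm; omega
      · rw [hks]; intro y hy; have := hall y hy; omega
      · have h0 : (x :: xs).countP (fun y => decide (y ≤ prev)) = 0 :=
          List.countP_eq_zero.mpr (fun y hy => by
            simp only [decide_eq_true_eq]; have := hall y hy; omega)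
        rw [hks, List.countP_cons, h0]
        simp
      · rw [hks]; simp
      · rw [hks]; simp
      · rw [hks]
        intro y hy hge
        rcases List.mem_cons.mp hy with he | hm
        · omega
        · exact hm

/-- MAIN, A-side: on a sorted list A's scan value is an attained upper bound of the run sums. -/
theorem hrun_main : ∀ (n : Nat) (xs : List Int) (s : Int), xs.length ≤ n →
    List.Pairwise (· ≤ ·) (s :: xs) →
    (∀ v, v ∈ s :: xs → (v - 1) ∉ s :: xs → ivsum (s :: xs) v ≤ hrun 1 s xs) ∧
    (∃ v, v ∈ s :: xs ∧ (v - 1) ∉ s :: xs ∧ hrun 1 s xs = ivsum (s :: xs) v) := by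
  intro n
  induction n using Nat.strong_induction_on with
  | _ n IH =>
  intro xs s hlen hp
  obtain ⟨t, hst, H1, H2, H3, H4, H5, H6, H7⟩ := runsSplit_struct xs s hp
  rcases hr : runsSplit s xs with ⟨k, r⟩
  rw [hr] at H3 H4 H5 H6 H7
  simp only [] at H3 H4 H5 H6 H7
  have hmin : ∀ x ∈ s :: xs, s ≤ x := by
    intro x hx
    rcases List.mem_cons.mp hx with he | hm
    · omega
    · exact (List.pairwise_cons.mp hp).1 x hm
  have ht1 : (t + 1) ∉ s :: xs := by
    intro hmem
    rcases H2 _ hmem with h | h <;> omega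
  have hivs : ivsum (s :: xs) s = (k : Int) + 1 := by
    rw [ivsum_interval (t + 1 - s).toNat s t (s :: xs) rfl (by omega) H1 ht1]
    rw [show (s :: xs).countP (fun x => decide (s ≤ x ∧ x ≤ t))
          = (s :: xs).countP (fun x => decide (x ≤ t)) from
        List.countP_congr (by
          intro x hx
          have := hmin x hx
          by_cases h : x ≤ t <;> simp [h] <;> omega)]
    exact H4
  have hsmem : s ∈ s :: xs := by simp
  have hsstart : (s - 1) ∉ s :: xs := by
    intro hmem; have := hmin _ hmem; omega
  have hstart_low : ∀ v, v ∈ s :: xs → (v - 1) ∉ s :: xs → v ≠ s → t + 2 ≤ v := by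
    intro v hv hnv hne
    have hsv := hmin v hv
    rcases H2 v hv with h | h
    · exfalso
      exact hnv (H1 (v - 1) (by omega) (by omega))
    · exact h
  cases r with
  | nil =>
    rw [hrun_rs_nil xs 1 s k hr]
    constructor
    · intro v hv hnv
      by_cases hvs : v = s
      · subst hvs; rw [hivs]; omega
      · exfalso
        have hv2 := hstart_low v hv hnv hvs
        have := H7 v hv hv2
        simp at this
    · exact ⟨s, hsmem, hsstart, by rw [hivs]; ring⟩
  | cons y ys =>
    rw [hrun_rs_cons xs 1 s k y ys hr]
    have hrsub : (y :: ys).Sublist (s :: xs) := by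
      rw [H5]
      exact (List.drop_sublist k xs).trans (List.sublist_cons_self s xs)
    have hpr : List.Pairwise (· ≤ ·) (y :: ys) := hp.sublist hrsub
    have hylen : ys.length < n := by
      have h2 : (y :: ys).length ≤ xs.length := by
        rw [H5]; simpa using List.length_drop_le k xs
      simp at h2
      omega
    have hcnt : ∀ w, t + 2 ≤ w → (s :: xs).count w = (y :: ys).count w := by
      intro w hw
      have hxsplit : xs = xs.take k ++ xs.drop k := (List.take_append_drop k xs).symm
      conv_lhs => rw [hxsplit, ← H5]
      rw [List.count_cons, List.count_append]
      have hz : (xs.take k).count w = 0 := by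
        apply List.count_eq_zero.mpr
        intro hmem
        have := H6 w (by simp; right; exact hmem)
        omega
      have hzs : ¬ (s = w) := by omega
      simp [hz, hzs]
    have hiveq : ∀ v, t + 2 ≤ v → ivsum (s :: xs) v = ivsum (y :: ys) v := by
      intro v hv
      exact ivsum_congr_ge _ _ _ (fun w hw => hcnt w (by omega))
    have hy2 : t + 2 ≤ y := H3 y (by simp)
    obtain ⟨P1r, P2r⟩ := IH ys.length hylen ys y le_rfl hpr
    have hup : ∀ v, v ∈ y :: ys → (v - 1) ∉ y :: ys → v ∈ s :: xs ∧ (v - 1) ∉ s :: xs := by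
      intro v hv hnv
      have hvmem : v ∈ s :: xs := hrsub.subset hv
      refine ⟨hvmem, fun hmem => ?_⟩
      have hvy : y ≤ v := by
        rcases List.mem_cons.mp hv with he | hm
        · omega
        · exact (List.pairwise_cons.mp hpr).1 v hm
      rcases H2 _ hmem with h | h
      · omega
      · exact hnv (H7 _ hmem h)
    constructor
    · intro v hv hnv
      by_cases hvs : v = s
      · subst hvs; rw [hivs]
        exact le_max_of_le_left (by omega)
      · have hv2 := hstart_low v hv hnv hvs
        have hvr : v ∈ y :: ys := H7 v hv hv2
        have hnvr : (v - 1) ∉ y :: ys := fun hm => hnv (hrsub.subset hm)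
        have := P1r v hvr hnvr
        rw [hiveq v hv2]
        exact le_max_of_le_right this
    · obtain ⟨v0, hv0, hnv0, he0⟩ := P2r
      obtain ⟨hv0m, hnv0m⟩ := hup v0 hv0 hnv0
      have hv0y : y ≤ v0 := by
        rcases List.mem_cons.mp hv0 with he | hm
        · omega
        · exact (List.pairwise_cons.mp hpr).1 _ hm
      have hv02 : t + 2 ≤ v0 := by omega
      rcases max_choice (1 + (k : Int)) (hrun 1 y ys) with hmx | hmx
      · exact ⟨s, hsmem, hsstart, by rw [hmx, hivs]; ring⟩
      · refine ⟨v0, hv0m, hnv0m, ?_⟩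
        rw [hmx, he0, hiveq v0 hv02]

-- ===== B side =====

theorem walkRunB_eq_ivsum (tickets : List Int) :
    ∀ (fuel : Nat) (v total : Int),
      (tickets.toFinset.filter (fun w => v ≤ w)).card ≤ fuel →
      walkRunB (PySem.Dict.counter tickets) (PySem.Set.ofList tickets) fuel v total
        = total + ivsum tickets v := by
  intro fuel
  induction fuel with
  | zero =>
    intro v total hf
    have hv : v ∉ tickets := by
      intro hm
      have : v ∈ tickets.toFinset.filter (fun w => v ≤ w) := by
        simp only [Finset.mem_filter, List.mem_toFinset]; exact ⟨hm, le_rfl⟩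
      have := Finset.card_pos.mpr ⟨v, this⟩
      omega
    rw [ivsum_of_not_mem hv]
    simp [walkRunB]
  | succ fuel ih =>
    intro v total hf
    have hc : List.contains (PySem.Set.ofList tickets) v = decide (v ∈ tickets) := by
      simp [PySem.Set.mem_ofList]
    by_cases hv : v ∈ tickets
    · rw [walkRunB, hc, if_pos (by simpa using hv), PySem.Dict.getD_counter,
        ih (v + 1) _ (by have := card_filter_succ_lt tickets v hv; omega)]
      rw [show ivsum tickets v = (tickets.count v : Int) + ivsum tickets (v + 1) from by
        rw [ivsum]; simp [hv]]
      ring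
    · rw [walkRunB, hc, if_neg (by simpa using hv), ivsum_of_not_mem hv]
      ring

/-- The guarded running-max loop of B: lower bounds and attainment. -/
theorem foldl_gmax (p : Int → Bool) (g : Int → Int) : ∀ (l : List Int) (b : Int),
    (b ≤ l.foldl (fun acc v => if p v then acc else max acc (g v)) b) ∧
    (∀ v ∈ l, p v = false → g v ≤ l.foldl (fun acc v => if p v then acc else max acc (g v)) b) ∧
    (l.foldl (fun acc v => if p v then acc else max acc (g v)) b = b ∨
      ∃ v ∈ l, p v = false ∧ l.foldl (fun acc v => if p v then acc else max acc (g v)) b = g v) := by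
  intro l
  induction l with
  | nil => intro b; simp
  | cons x l ih =>
    intro b
    simp only [List.foldl_cons]
    by_cases hx : p x
    · rw [if_pos hx]
      obtain ⟨i1, i2, i3⟩ := ih b
      refine ⟨i1, ?_, ?_⟩
      · intro v hv hf
        rcases List.mem_cons.mp hv with he | hm
        · subst he; rw [hx] at hf; cases hf
        · exact i2 v hm hf
      · rcases i3 with h | ⟨v, hv, hf, he⟩
        · exact Or.inl h
        · exact Or.inr ⟨v, by simp [hv], hf, he⟩
    · rw [if_neg hx]
      obtain ⟨i1, i2, i3⟩ := ih (max b (g x))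
      refine ⟨le_trans (le_max_left _ _) i1, ?_, ?_⟩
      · intro v hv hf
        rcases List.mem_cons.mp hv with he | hm
        · subst he; exact le_trans (le_max_right _ _) i1
        · exact i2 v hm hf
      · rcases i3 with h | ⟨v, hv, hf, he⟩
        · rcases max_choice b (g x) with hm | hm
          · exact Or.inl (by rw [h, hm])
          · exact Or.inr ⟨x, by simp, Bool.eq_false_iff.mpr hx, by rw [h, hm]⟩
        · exact Or.inr ⟨v, by simp [hv], hf, he⟩

theorem setOfList_length (tickets : List Int) :
    (PySem.Set.ofList tickets).length = tickets.toFinset.card := by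
  have h1 : (PySem.Set.ofList tickets).toFinset = tickets.toFinset := by
    apply Finset.ext
    intro a
    simp [List.mem_toFinset, PySem.Set.mem_ofList]
  rw [← h1, List.toFinset_card_of_nodup (PySem.Set.nodup_ofList tickets)]

/-- MAIN, B-side: B's value is an attained upper bound of the run sums. -/
theorem alt_char (tickets : List Int) :
    (∀ v, v ∈ tickets → (v - 1) ∉ tickets → ivsum tickets v ≤ max_tickets_alt tickets) ∧
    (max_tickets_alt tickets = 0 ∨
      ∃ v, v ∈ tickets ∧ (v - 1) ∉ tickets ∧ max_tickets_alt tickets = ivsum tickets v) := by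
  have hcounts : tickets.foldl (fun d t => d.insert t (d.getD t 0 + 1)) PySem.Dict.empty
      = PySem.Dict.counter tickets := PySem.Dict.foldl_insert_getD_add_one_eq_counter tickets
  have hkeys : (PySem.Dict.counter tickets).keys = PySem.Set.ofList tickets :=
    PySem.Dict.keys_counter tickets
  have hself : PySem.Set.ofList (PySem.Set.ofList tickets : List Int) = PySem.Set.ofList tickets :=
    PySem.Set.ofList_eq_self_of_nodup _ (PySem.Set.nodup_ofList tickets)
  have hval : max_tickets_alt tickets
      = (PySem.Set.ofList tickets).foldl
          (fun best v => if List.contains (PySem.Set.ofList tickets) (v - 1) then best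
            else max best (ivsum tickets v)) 0 := by
    unfold max_tickets_alt
    simp only [hcounts, hkeys, hself]
    apply PySem.List.foldl_congr_mem
    intro acc v _
    congr 1
    rw [walkRunB_eq_ivsum tickets _ v 0 (by
      rw [setOfList_length]
      exact Finset.card_filter_le _ _)]
    ring
  have hcont : ∀ w : Int, List.contains (PySem.Set.ofList tickets) w = decide (w ∈ tickets) := by
    intro w
    simp [PySem.Set.mem_ofList]
  obtain ⟨g1, g2, g3⟩ := foldl_gmax
    (fun v => List.contains (PySem.Set.ofList tickets) (v - 1))
    (fun v => ivsum tickets v) (PySem.Set.ofList tickets) 0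
  constructor
  · intro v hv hnv
    rw [hval]
    exact g2 v ((PySem.Set.mem_ofList tickets v).mpr hv) (by rw [hcont]; simpa using hnv)
  · rw [hval]
    rcases g3 with h | ⟨v, hv, hf, he⟩
    · exact Or.inl h
    · refine Or.inr ⟨v, (PySem.Set.mem_ofList tickets v).mp hv, ?_, he⟩
      rw [hcont] at hf
      simpa using hf

-- ===== A side: fold conversion =====

theorem foldl_pyRange_getD {σ : Type} (xs : List Int) (g : σ → Int → σ) :
    ∀ (n j : Nat) (st : σ), xs.length - j = n →
      (PySem.List.pyRange (j : Int) (xs.length : Int)).foldl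
          (fun st i => g st (PySem.List.pyGetD xs i 0)) st
        = (xs.drop j).foldl g st := by
  intro n
  induction n with
  | zero =>
    intro j st hn
    have hj : xs.length ≤ j := by omega
    rw [PySem.List.pyRange_one_eq_nil (by exact_mod_cast hj),
      List.drop_eq_nil_of_le hj]
    rfl
  | succ n ih =>
    intro j st hn
    have hj : j < xs.length := by omega
    rw [PySem.List.pyRange_one_cons (by exact_mod_cast hj)]
    rw [List.drop_eq_getElem_cons hj]
    simp only [List.foldl_cons]
    rw [PySem.List.pyGetD_eq_getElem xs 0 (by positivity) (by exact_mod_cast hj)]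
    have hcast : ((j : Int) + 1) = ((j + 1 : Nat) : Int) := by push_cast; ring
    rw [hcast, ih (j + 1) _ (by omega)]
    simp

theorem foldl_pyRange_getD_one {σ : Type} (xs : List Int) (g : σ → Int → σ) (st : σ) :
    (PySem.List.pyRange 1 (xs.length : Int)).foldl
        (fun st i => g st (PySem.List.pyGetD xs i 0)) st
      = (xs.drop 1).foldl g st := by
  have h := foldl_pyRange_getD xs g (xs.length - 1) 1 st rfl
  simpa using h

theorem foldA : ∀ (l : List Int) (curr maxv prev : Int), curr ≤ maxv →
    (l.foldl (fun (st : Int × Int × Int) x =>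
        let curr_sub_len := if st.2.2 == x || st.2.2 + 1 == x then st.1 + 1 else 1
        (curr_sub_len, max st.2.1 curr_sub_len, x)) (curr, maxv, prev)).2.1
      = max maxv (hrun curr prev l) := by
  intro l
  induction l with
  | nil =>
    intro curr maxv prev h
    simp only [List.foldl_nil, hrun]
    omega
  | cons x l ih =>
    intro curr maxv prev h
    simp only [List.foldl_cons, hrun]
    by_cases hb : x = prev ∨ x = prev + 1
    · have hcond : (prev == x || prev + 1 == x) = true := by
        rcases hb with h1 | h1 <;> simp [h1]
      simp only [hcond, if_pos, Bool.if_true_left, if_true, hb]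
      rw [ih (curr + 1) (max maxv (curr + 1)) x (le_max_right _ _)]
      have h1 : curr + 1 ≤ hrun (curr + 1) x l := hrun_ge l (curr + 1) x
      rw [max_assoc, max_eq_right h1]
    · have hcond : (prev == x || prev + 1 == x) = false := by
        simp only [Bool.or_eq_false_iff, beq_eq_false_iff_ne]
        constructor <;> intro he <;> exact hb (by omega)
      simp only [hcond, if_neg, Bool.false_eq_true, if_false, hb]
      rw [ih 1 (max maxv 1) x (le_max_right _ _)]
      have h1 : (1 : Int) ≤ hrun 1 x l := hrun_ge l 1 x
      rw [max_assoc, max_eq_right h1, ← max_assoc, max_eq_left h]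

theorem max_tickets_eq_hrun (tickets : List Int) (h : tickets ≠ []) :
    max_tickets tickets
      = hrun 1 ((PySem.List.sorted tickets (fun x => x)).headI)
          ((PySem.List.sorted tickets (fun x => x)).tail) := by
  by_cases h1 : tickets.length = 1
  · obtain ⟨a, rfl⟩ := List.length_eq_one_iff.mp h1
    have hs : PySem.List.sorted [a] (fun x => x) = [a] :=
      List.perm_singleton.mp (PySem.List.sorted_perm [a] (fun x => x) false)
    rw [max_tickets, hs]
    simp [hrun]
  · have hne : PySem.List.sorted tickets (fun x => x) ≠ [] := by
      rw [Ne, PySem.List.sorted_eq_nil_iff]; exact h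
    rcases hL : PySem.List.sorted tickets (fun x => x) with _ | ⟨s, L'⟩
    · exact absurd hL hne
    rw [max_tickets]
    rw [if_neg (by simpa using h1)]
    simp only [hL]
    have key := foldl_pyRange_getD_one (s :: L') (fun (st : Int × Int × Int) x =>
        (if st.2.2 == x || st.2.2 + 1 == x then st.1 + 1 else 1,
         max st.2.1 (if st.2.2 == x || st.2.2 + 1 == x then st.1 + 1 else 1), x))
      ((1 : Int), (1 : Int), PySem.List.pyGetD (s :: L') 0 0)
    rw [key]
    rw [show PySem.List.pyGetD (s :: L') 0 0 = s from by
      rw [PySem.List.pyGetD_eq_getElem (s :: L') 0 (by norm_num) (by simp)]; simp]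
    rw [show (s :: L').drop 1 = L' from rfl]
    rw [foldA L' 1 1 s le_rfl]
    simp only [List.headI, List.tail]
    exact max_eq_right (hrun_ge L' 1 s)

-- ===== VERDICT (by name: the statement is the Claim_ definition above) =====
theorem max_tickets_spec : Claim_equal_max_tickets := by
  intro tickets _ hpre
  show max_tickets tickets = max_tickets_alt tickets
  have hne : PySem.List.sorted tickets (fun x => x) ≠ [] := by
    rw [Ne, PySem.List.sorted_eq_nil_iff]; exact hpre
  rcases hL : PySem.List.sorted tickets (fun x => x) with _ | ⟨s, L'⟩
  · exact absurd hL hne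
  have hperm : (s :: L').Perm tickets := by
    rw [← hL]; exact PySem.List.sorted_perm tickets (fun x => x) false
  have hp : List.Pairwise (· ≤ ·) (s :: L') := by
    rw [← hL]; exact PySem.List.sorted_pairwise tickets (fun x => x)
  have hA : max_tickets tickets = hrun 1 s L' := by
    rw [max_tickets_eq_hrun tickets hpre, hL]
    simp [List.headI, List.tail]
  obtain ⟨P1, P2⟩ := hrun_main L'.length L' s le_rfl hp
  have htr : ∀ v, ivsum (s :: L') v = ivsum tickets v :=
    fun v => ivsum_congr_ge _ _ _ (fun w _ => hperm.count_eq w)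
  obtain ⟨Q1, Q2⟩ := alt_char tickets
  rw [hA]
  apply le_antisymm
  · obtain ⟨v, hv, hnv, he⟩ := P2
    rw [he, htr v]
    exact Q1 v (hperm.mem_iff.mp hv) (fun hm => hnv (hperm.mem_iff.mpr hm))
  · rcases Q2 with h0 | ⟨v, hv, hnv, he⟩
    · rw [h0]
      exact le_trans (by norm_num) (hrun_ge L' 1 s)
    · rw [he, ← htr v]
      exact P1 v (hperm.mem_iff.mpr hv) (fun hm => hnv (hperm.mem_iff.mp hm))
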